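-- pv_equiv track=rewrite | github.com/sagshah10/Python-Dictionary-Splitter | supportScript.py | cleanUpAvailableCount
-- ===== SOURCE A (Python) =====
-- def cleanUpAvailableCount(availableCount):
--
--     i = 0
--     previous = availableCount[0]
--     lastKnownSequence = availableCount[0]
--     lastKnownSequencePosition = 0
--
--     while i < len(availableCount):
--         if (availableCount[i] - 1) != previous:
--             lastKnownSequence = availableCount[i]
--             lastKnownSequencePosition = i
--
--         previous = availableCount[i]
--         i += 1
--
--     toReturn = sorted(list(set(availableCount[0:lastKnownSequencePosition + 1])))
--     return toReturn
-- ===== SOURCE B (Python) =====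
-- def cleanUpAvailableCount(availableCount):
--     # Backward scan: find the last position where the sequence breaks.
--     pos = 0
--     for i in range(len(availableCount) - 1, 0, -1):
--         if availableCount[i] - 1 != availableCount[i - 1]:
--             pos = i
--             break
--     return sorted(set(availableCount[0:pos + 1]))
-- ===== Notes on version B (the rewrite author's own statement) =====
-- stated objective: faster
-- what changed: Replaces the forward while-loop that tracks a running 'previous' value and keeps overwriting the break position with a backward for-loop that stops at the first (i.e. last) break index, dropping the accumulator state and terminating early.
-- crash fix: On the empty list A raises IndexError (availableCount[0]); B's backward loop is vacuous there and it returns []. — e.g. on cleanUpAvailableCount([]): A raises IndexError, B returns []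
import Mathlib
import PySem

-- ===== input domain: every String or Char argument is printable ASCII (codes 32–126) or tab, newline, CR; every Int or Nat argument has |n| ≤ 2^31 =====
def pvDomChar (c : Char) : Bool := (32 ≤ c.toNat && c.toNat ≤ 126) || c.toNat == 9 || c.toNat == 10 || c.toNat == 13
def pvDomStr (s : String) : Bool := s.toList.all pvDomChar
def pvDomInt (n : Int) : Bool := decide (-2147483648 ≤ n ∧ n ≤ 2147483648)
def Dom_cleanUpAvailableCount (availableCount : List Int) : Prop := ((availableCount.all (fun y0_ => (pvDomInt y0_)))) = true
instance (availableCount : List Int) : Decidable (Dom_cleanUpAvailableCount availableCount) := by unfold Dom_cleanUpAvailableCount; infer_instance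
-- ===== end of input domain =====

-- B replaces A's forward scan with running 'previous' accumulator by a backward scan
-- stopping at the last break index (objective: simpler; return value only, no mutation).

-- ===== PORT A =====
-- the while-loop: state (previous, lastKnownSequence, lastKnownSequencePosition), i counts up
def pvALoop (xs : List Int) (i : Nat) (previous lks : Int) (pos : Nat) : Int × Nat :=
  if _h : i < xs.length then
    let c := PySem.List.pyGetD xs (i : Int) 0   -- availableCount[i], in range here
    if c - 1 ≠ previous then pvALoop xs (i + 1) c c i
    else pvALoop xs (i + 1) c lks pos
  else (lks, pos)
termination_by xs.length - i

def cleanUpAvailableCount (availableCount : List Int) : List Int :=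
  match PySem.List.pyGet? availableCount 0 with
  | none => []   -- IndexError on the empty list; excluded by Pre_
  | some a0 =>
    let r := pvALoop availableCount 0 a0 a0 0
    PySem.List.sorted
      (PySem.Set.ofList (PySem.List.slice availableCount (some 0) (some ((r.2 : Int) + 1))))
      (fun x => x) false

-- ===== PORT B =====
-- for i in range(len(xs)-1, 0, -1): stop at the first i with xs[i] - 1 != xs[i-1]; else 0
def pvFindCut (xs : List Int) : Nat → Nat
  | 0 => 0
  | i + 1 =>
    if PySem.List.pyGetD xs ((i : Int) + 1) 0 - 1 ≠ PySem.List.pyGetD xs (i : Int) 0 then i + 1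
    else pvFindCut xs i

def cleanUpAvailableCount_alt (availableCount : List Int) : List Int :=
  let pos := pvFindCut availableCount (availableCount.length - 1)
  PySem.List.sorted
    (PySem.Set.ofList (PySem.List.slice availableCount (some 0) (some ((pos : Int) + 1))))
    (fun x => x) false

-- ===== PRECONDITION & SPEC =====
-- A raises IndexError on the empty list (availableCount[0]); Pre_ excludes exactly that input.
def Pre_cleanUpAvailableCount (availableCount : List Int) : Prop := availableCount ≠ []
instance (availableCount : List Int) : Decidable (Pre_cleanUpAvailableCount availableCount) := by unfold Pre_cleanUpAvailableCount; infer_instance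
def pvWitness_cleanUpAvailableCount : List Int := [3, 4, 5, 9, 10]

-- On the empty list A raises IndexError; B's backward loop is vacuous and returns [].
def Raises_cleanUpAvailableCount (availableCount : List Int) : Prop := availableCount = []
instance (availableCount : List Int) : Decidable (Raises_cleanUpAvailableCount availableCount) := by unfold Raises_cleanUpAvailableCount; infer_instance
def pvRaiseWitness_cleanUpAvailableCount : List Int := []
def pvRaiseWitnessOut_cleanUpAvailableCount : List Int := []

def Spec_cleanUpAvailableCount (availableCount : List Int) (out : List Int) : Prop := out = cleanUpAvailableCount_alt availableCount
instance (availableCount : List Int) (out : List Int) : Decidable (Spec_cleanUpAvailableCount availableCount out) := by unfold Spec_cleanUpAvailableCount; infer_instance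

-- ===== CLAIM (what is proved, stated in full; the proofs are below) =====
def Claim_equal_cleanUpAvailableCount : Prop := ∀ (availableCount : List Int), Dom_cleanUpAvailableCount availableCount → Pre_cleanUpAvailableCount availableCount → Spec_cleanUpAvailableCount availableCount (cleanUpAvailableCount availableCount)
def Claim_raises_cleanUpAvailableCount : Prop := (∀ (availableCount : List Int), Dom_cleanUpAvailableCount availableCount → Raises_cleanUpAvailableCount availableCount → ¬ Pre_cleanUpAvailableCount availableCount) ∧ (Dom_cleanUpAvailableCount (pvRaiseWitness_cleanUpAvailableCount) ∧ Raises_cleanUpAvailableCount (pvRaiseWitness_cleanUpAvailableCount) ∧ cleanUpAvailableCount_alt (pvRaiseWitness_cleanUpAvailableCount) = pvRaiseWitnessOut_cleanUpAvailableCount)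

-- ===== LEMMAS AND PROOFS =====

-- one unfolding step of the forward loop
theorem pvALoop_step (xs : List Int) (i : Nat) (prev lks : Int) (pos : Nat)
    (h : i < xs.length) :
    pvALoop xs i prev lks pos =
      (if PySem.List.pyGetD xs (i : Int) 0 - 1 ≠ prev then
        pvALoop xs (i + 1) (PySem.List.pyGetD xs (i : Int) 0) (PySem.List.pyGetD xs (i : Int) 0) i
      else pvALoop xs (i + 1) (PySem.List.pyGetD xs (i : Int) 0) lks pos) := by
  conv_lhs => rw [pvALoop]
  simp only [h, dif_pos]

theorem pvALoop_last (xs : List Int) (i : Nat) (prev lks : Int) (pos : Nat)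
    (h : ¬ i < xs.length) : pvALoop xs i prev lks pos = (lks, pos) := by
  rw [pvALoop]; simp only [h, dif_neg, not_false_iff]

-- pvFindCut at i+1, with the cast written at i+1
theorem pvFindCut_succ' (xs : List Int) (i : Nat) (h : 1 ≤ i) :
    pvFindCut xs i =
      if PySem.List.pyGetD xs (i : Int) 0 - 1 ≠ PySem.List.pyGetD xs ((i : Int) - 1) 0 then i
      else pvFindCut xs (i - 1) := by
  obtain ⟨j, rfl⟩ : ∃ j, i = j + 1 := ⟨i - 1, by omega⟩
  show (if PySem.List.pyGetD xs ((j : Int) + 1) 0 - 1 ≠ PySem.List.pyGetD xs (j : Int) 0 then j + 1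
      else pvFindCut xs j) = _
  push_cast
  have h3 : ((j : Int) + 1 - 1) = (j : Int) := by ring
  rw [h3]

-- Invariant: the forward loop started at i ≥ 1 with previous = xs[i-1] and the cut of the
-- prefix [0, i-1] as position finishes with the cut of the whole list.
theorem pvALoop_eq_findCut (xs : List Int) (i : Nat) (lks : Int)
    (h1 : 1 ≤ i) (h2 : i ≤ xs.length) :
    (pvALoop xs i (PySem.List.pyGetD xs ((i : Int) - 1) 0) lks (pvFindCut xs (i - 1))).2
      = pvFindCut xs (xs.length - 1) := by
  by_cases hlt : i < xs.length
  · rw [pvALoop_step xs i _ lks _ hlt]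
    have hidx : ((i + 1 : Nat) : Int) - 1 = (i : Int) := by push_cast; ring
    have hfc := pvFindCut_succ' xs i h1
    by_cases hbrk : PySem.List.pyGetD xs (i : Int) 0 - 1 ≠ PySem.List.pyGetD xs ((i : Int) - 1) 0
    · rw [if_pos hbrk]
      have hfc' : pvFindCut xs ((i + 1) - 1) = i := by
        rw [Nat.add_sub_cancel, hfc, if_pos hbrk]
      have := pvALoop_eq_findCut xs (i + 1) (PySem.List.pyGetD xs (i : Int) 0) (by omega) (by omega)
      rw [hidx, hfc'] at this
      exact this
    · rw [if_neg hbrk]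
      have hfc' : pvFindCut xs ((i + 1) - 1) = pvFindCut xs (i - 1) := by
        rw [Nat.add_sub_cancel, hfc, if_neg hbrk]
      have := pvALoop_eq_findCut xs (i + 1) lks (by omega) (by omega)
      rw [hidx, hfc'] at this
      exact this
  · have hi : i = xs.length := by omega
    rw [pvALoop_last xs i _ lks _ hlt]
    rw [hi]
termination_by xs.length - i

theorem pvALoop_start (x : Int) (t : List Int) :
    (pvALoop (x :: t) 0 x x 0).2 = pvFindCut (x :: t) ((x :: t).length - 1) := by
  have hget0 : PySem.List.pyGetD (x :: t) ((0 : Nat) : Int) 0 = x := by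
    simp [PySem.List.pyGetD]
  have h0 : (0 : Nat) < (x :: t).length := by simp
  rw [pvALoop_step (x :: t) 0 x x 0 h0, if_pos (by rw [hget0]; omega), hget0]
  have := pvALoop_eq_findCut (x :: t) 1 x (le_refl 1) (by simp)
  have hc : ((1 : Nat) : Int) - 1 = ((0 : Nat) : Int) := by norm_num
  rw [hc, hget0] at this
  simpa [pvFindCut] using this

-- ===== VERDICT (by name: the statement is the Claim_ definition above) =====
theorem cleanUpAvailableCount_spec : Claim_equal_cleanUpAvailableCount := by
  intro xs _hdom hpre
  unfold Spec_cleanUpAvailableCount cleanUpAvailableCount cleanUpAvailableCount_alt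
  obtain ⟨x, t, rfl⟩ : ∃ x t, xs = x :: t := by
    cases xs with
    | nil => exact absurd rfl hpre
    | cons a b => exact ⟨a, b, rfl⟩
  have hget : PySem.List.pyGet? (x :: t) 0 = some x := by
    simp [PySem.List.pyGet?, PySem.List.pyIdx?]
  rw [hget]
  simp only
  rw [pvALoop_start]

theorem cleanUpAvailableCount_raises : Claim_raises_cleanUpAvailableCount := by
  unfold Claim_raises_cleanUpAvailableCount
  constructor
  · intro xs _ h
    unfold Raises_cleanUpAvailableCount at h
    unfold Pre_cleanUpAvailableCount
    simp [h]
  · exact ⟨by decide, by decide, by decide⟩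

-- witness self-check: B's port really returns [] at the raise witness (uses the raises theorem)
theorem pvRaiseWitness_cleanUpAvailableCount_ok :
    cleanUpAvailableCount_alt pvRaiseWitness_cleanUpAvailableCount = pvRaiseWitnessOut_cleanUpAvailableCount :=
  cleanUpAvailableCount_raises.2.2.2
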